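-- pv_equiv track=rewrite | github.com/arozans/idenface | src/utils/model_params_calc.py | _calculate_dense_params
-- ===== SOURCE A (Python) =====
-- from typing import List
--
-- def _calculate_dense_params(conv_output_size: int, filters: List[int], dense_units: List[int], subnets_num: int):
--     params_num = 0
--     for i, units in enumerate(dense_units):
--         if i == 0:
--             params_num = params_num + ((conv_output_size * conv_output_size * filters[-1] * subnets_num + 1) * units)
--         else:
--             params_num = params_num + ((dense_units[i - 1] + 1) * units)
--     return params_num
-- ===== SOURCE B (Python) =====
-- def _calculate_dense_params(conv_output_size, filters, dense_units, subnets_num):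
--     # Algebraic decomposition: (fan_in + 1) * units distributes into a bias term
--     # and a weight term, so the grand total is three independent sums:
--     #   biases        = sum(dense_units)                      (one bias per unit)
--     #   first weights = input_size * dense_units[0]
--     #   chain weights = dot(dense_units[:-1], dense_units[1:])
--     if not dense_units:
--         return 0
--     input_size = conv_output_size * conv_output_size * filters[-1] * subnets_num
--     biases = sum(dense_units)
--     first_weights = input_size * dense_units[0]
--     chain_weights = sum(a * b for a, b in zip(dense_units, dense_units[1:]))
--     return biases + first_weights + chain_weights
-- ===== Notes on version B (the rewrite author's own statement) =====
-- stated objective: alternative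
-- what changed: Instead of A's per-layer accumulation of (fan_in+1)*units with an i==0 branch, B algebraically distributes the product and computes three independent sums: the total bias count sum(dense_units), the first-layer weight block input_size*dense_units[0], and the weight chain dot(dense_units[:-1], dense_units[1:]).
import Mathlib
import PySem

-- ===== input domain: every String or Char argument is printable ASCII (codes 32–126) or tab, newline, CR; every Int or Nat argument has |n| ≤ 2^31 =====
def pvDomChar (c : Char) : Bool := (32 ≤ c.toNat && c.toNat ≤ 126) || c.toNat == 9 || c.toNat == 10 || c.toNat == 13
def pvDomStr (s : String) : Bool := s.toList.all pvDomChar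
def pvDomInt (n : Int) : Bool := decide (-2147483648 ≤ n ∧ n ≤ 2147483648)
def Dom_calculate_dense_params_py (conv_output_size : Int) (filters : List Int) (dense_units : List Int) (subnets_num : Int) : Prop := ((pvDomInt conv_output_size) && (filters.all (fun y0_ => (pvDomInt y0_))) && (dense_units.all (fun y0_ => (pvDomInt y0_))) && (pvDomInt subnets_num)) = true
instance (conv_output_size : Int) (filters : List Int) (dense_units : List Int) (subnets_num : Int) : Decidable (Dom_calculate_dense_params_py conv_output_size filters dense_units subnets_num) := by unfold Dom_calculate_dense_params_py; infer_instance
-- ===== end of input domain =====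

-- B replaces A's per-layer accumulation of (fan_in+1)*units by an algebraic split into
-- three independent sums (biases, first-layer weights, weight-chain dot product); objective: alternative.

-- ===== PORT A =====
def calculate_dense_params_py (conv_output_size : Int) (filters : List Int) (dense_units : List Int) (subnets_num : Int) : Int :=
  (PySem.List.enumerate dense_units 0).foldl
    (fun params_num iu =>
      if iu.1 = 0 then
        params_num + ((conv_output_size * conv_output_size * ((PySem.List.pyGet? filters (-1)).getD 0) * subnets_num + 1) * iu.2)
      else
        params_num + (((PySem.List.pyGet? dense_units (iu.1 - 1)).getD 0 + 1) * iu.2)) 0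

-- ===== PORT B =====
def calculate_dense_params_py_alt (conv_output_size : Int) (filters : List Int) (dense_units : List Int) (subnets_num : Int) : Int :=
  match dense_units with
  | [] => 0
  | u0 :: rest =>
    let input_size := conv_output_size * conv_output_size * ((PySem.List.pyGet? filters (-1)).getD 0) * subnets_num
    let biases := (u0 :: rest).sum
    let first_weights := input_size * u0
    let chain_weights := (((u0 :: rest).zip rest).map (fun p => p.1 * p.2)).sum
    biases + first_weights + chain_weights

-- ===== PRECONDITION & SPEC =====
-- Pre_ excludes exactly the inputs where Python A raises IndexError (filters[-1] on
-- empty filters with nonempty dense_units); B raises the same error there.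
def Pre_calculate_dense_params_py (conv_output_size : Int) (filters : List Int) (dense_units : List Int) (subnets_num : Int) : Prop :=
  dense_units = [] ∨ filters ≠ []
instance (conv_output_size : Int) (filters : List Int) (dense_units : List Int) (subnets_num : Int) : Decidable (Pre_calculate_dense_params_py conv_output_size filters dense_units subnets_num) := by unfold Pre_calculate_dense_params_py; infer_instance

def pvWitness_calculate_dense_params_py : Int × List Int × List Int × Int := (4, [8, 16], [32, 10], 2)

def Spec_calculate_dense_params_py (conv_output_size : Int) (filters : List Int) (dense_units : List Int) (subnets_num : Int) (out : Int) : Prop := out = calculate_dense_params_py_alt conv_output_size filters dense_units subnets_num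
instance (conv_output_size : Int) (filters : List Int) (dense_units : List Int) (subnets_num : Int) (out : Int) : Decidable (Spec_calculate_dense_params_py conv_output_size filters dense_units subnets_num out) := by unfold Spec_calculate_dense_params_py; infer_instance

-- ===== CLAIM (what is proved, stated in full; the proofs are below) =====
def Claim_equal_calculate_dense_params_py : Prop := ∀ (conv_output_size : Int) (filters : List Int) (dense_units : List Int) (subnets_num : Int), Dom_calculate_dense_params_py conv_output_size filters dense_units subnets_num → Pre_calculate_dense_params_py conv_output_size filters dense_units subnets_num → Spec_calculate_dense_params_py conv_output_size filters dense_units subnets_num (calculate_dense_params_py conv_output_size filters dense_units subnets_num)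

-- ===== LEMMAS AND PROOFS =====

-- The tail of A's fold (all enumerate indices ≥ k+1 > 0, so only the else branch fires)
-- equals the zip-sum of consecutive pairs of dense_units from position k on.
theorem pv_fold_tail (conv_output_size subnets_num : Int) (filters dense_units : List Int) :
    ∀ (rest : List Int) (k : Nat) (p acc : Int),
      PySem.List.pyGet? dense_units (k : Int) = some p →
      dense_units.drop (k + 1) = rest →
      (PySem.List.enumerate rest ((k : Int) + 1)).foldl
        (fun params_num iu =>
          if iu.1 = 0 then
            params_num + ((conv_output_size * conv_output_size * ((PySem.List.pyGet? filters (-1)).getD 0) * subnets_num + 1) * iu.2)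
          else
            params_num + (((PySem.List.pyGet? dense_units (iu.1 - 1)).getD 0 + 1) * iu.2)) acc
      = acc + (((p :: rest).zip rest).map (fun q => (q.1 + 1) * q.2)).sum := by
  intro rest
  induction rest with
  | nil =>
      intro k p acc _ _
      simp [PySem.List.enumerate]
  | cons r rs ih =>
      intro k p acc hget hdrop
      have hget' : PySem.List.pyGet? dense_units ((k : Int) + 1) = some r := by
        have h0 : (dense_units.drop (k+1))[0]? = some r := by simp [hdrop]
        have : dense_units[(k+1)]? = some r := by
          simpa [List.getElem?_drop] using h0
        rw [show ((k : Int) + 1) = ((k + 1 : Nat) : Int) by push_cast; ring,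
           PySem.List.pyGet?_natCast]
        exact this
      have hdrop' : dense_units.drop ((k + 1) + 1) = rs := by
        have : dense_units.drop (k + 1 + 1) = (dense_units.drop (k + 1)).drop 1 := by
          rw [List.drop_drop]
        simp [this, hdrop]
      have hk : ((k : Int) + 1) ≠ 0 := by omega
      have hprev : PySem.List.pyGet? dense_units ((k : Int) + 1 - 1) = some p := by
        simpa using hget
      rw [PySem.List.enumerate_cons]
      simp only [List.foldl_cons, if_neg hk, hprev]
      have := ih (k + 1) r (acc + (p + 1) * r) hget' hdrop'
      rw [show ((k + 1 : Nat) : Int) + 1 = (k : Int) + 1 + 1 by push_cast; ring] at this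
      simp only [Option.getD_some] at this ⊢
      rw [this]
      simp [List.zip_cons_cons]
      ring

-- Distributing (a+1)*b over the zip: the +1 contributes each element of the second
-- list (= the tail) exactly once.
theorem pv_zip_distrib (p : Int) (rest : List Int) :
    (((p :: rest).zip rest).map (fun q => (q.1 + 1) * q.2)).sum
      = rest.sum + (((p :: rest).zip rest).map (fun q => q.1 * q.2)).sum := by
  induction rest generalizing p with
  | nil => simp
  | cons r rs ih =>
      simp only [List.zip_cons_cons, List.map_cons, List.sum_cons, List.sum_cons, ih r]
      ring

-- ===== VERDICT (by name: the statement is the Claim_ definition above) =====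
theorem calculate_dense_params_py_spec : Claim_equal_calculate_dense_params_py := by
  intro c filters du s _ _
  unfold Spec_calculate_dense_params_py
  cases du with
  | nil => simp [calculate_dense_params_py, calculate_dense_params_py_alt, PySem.List.enumerate]
  | cons u rest =>
      unfold calculate_dense_params_py calculate_dense_params_py_alt
      rw [PySem.List.enumerate_cons]
      simp only [List.foldl_cons]
      norm_num
      have hget : PySem.List.pyGet? (u :: rest) ((0 : Nat) : Int) = some u := by
        simp
      have h := pv_fold_tail c s filters (u :: rest) rest 0 u
        (0 + ((c * c * ((PySem.List.pyGet? filters (-1)).getD 0) * s + 1) * u)) hget (by simp)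
      rw [show ((0 : Nat) : Int) + 1 = (1 : Int) by norm_num, zero_add] at h
      rw [h, pv_zip_distrib u rest]
      ring
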